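-- pv_equiv track=rewrite | github.com/llmware-ai/llmware | llmware/graph.py | _get_top_bigrams_exclude_special_tokens
-- ===== SOURCE A (Python) =====
-- from collections import Counter
--
-- def _get_top_bigrams_exclude_special_tokens(tokens, top_n):
--
--     """ Builds a list of the top bigrams in the library. """
--
--     bigrams = []
--     for z in range(1, len(tokens)):
--
--         # skip special tokens in the BOW starting with "[" and "<"
--         if str(tokens[z - 1]).startswith("[") or str(tokens[z - 1]).startswith("<") or \
--                 str(tokens[z]).startswith("[") or str(tokens[z]).startswith("<"):
--             do_nothing = 0
--         else:
--             # excluded the special tokens - capture bigram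
--
--             entry = (tokens[z - 1] + "_" + tokens[z])
--             bigrams.append(entry)
--
--     d = Counter(bigrams)
--     dc = d.most_common(top_n)
--
--     return dc
-- ===== SOURCE B (Python) =====
-- from collections import Counter
--
-- def _get_top_bigrams_exclude_special_tokens(tokens, top_n):
--     """ Builds a list of the top bigrams in the library. """
--     # segment the token stream into maximal runs of consecutive non-special tokens
--     runs = []
--     cur = []
--     for t in tokens:
--         if str(t).startswith(("[", "<")):
--             if cur:
--                 runs.append(cur)
--             cur = []
--         else:
--             cur.append(t)
--     if cur:
--         runs.append(cur)
--     # every bigram lies entirely inside one run; emit each run's adjacent pairs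
--     bigrams = [a + "_" + b for run in runs for a, b in zip(run, run[1:])]
--     return Counter(bigrams).most_common(top_n)
-- ===== Notes on version B (the rewrite author's own statement) =====
-- stated objective: alternative
-- what changed: B first segments the token stream into maximal runs of consecutive non-special tokens and then emits each run's internal adjacent pairs, instead of A's single indexed loop that re-tests both neighbours' special prefix for every pair; correctness rests on the fact that a kept bigram is exactly an adjacent pair inside one run.
import Mathlib
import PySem

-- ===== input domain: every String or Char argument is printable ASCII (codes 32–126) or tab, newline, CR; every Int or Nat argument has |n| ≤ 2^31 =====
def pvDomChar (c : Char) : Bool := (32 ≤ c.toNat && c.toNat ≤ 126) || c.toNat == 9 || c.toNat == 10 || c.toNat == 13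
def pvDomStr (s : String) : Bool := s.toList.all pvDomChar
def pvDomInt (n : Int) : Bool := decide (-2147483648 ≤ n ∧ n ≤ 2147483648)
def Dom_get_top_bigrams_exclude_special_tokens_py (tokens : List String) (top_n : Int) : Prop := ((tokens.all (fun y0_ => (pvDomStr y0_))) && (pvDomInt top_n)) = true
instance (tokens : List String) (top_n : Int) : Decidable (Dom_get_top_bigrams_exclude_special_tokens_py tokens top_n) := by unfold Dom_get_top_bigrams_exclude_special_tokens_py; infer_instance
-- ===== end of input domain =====

-- B replaces A's indexed pair loop (which re-tests the special prefix of both neighbours for every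
-- pair) by a run-segmentation: split the stream into maximal runs of non-special tokens, then emit
-- each run's adjacent pairs; same Counter/most_common tail (alternative decomposition, not faster).

-- ===== PORT A =====
def get_top_bigrams_exclude_special_tokens_py (tokens : List String) (top_n : Int) : List (String × Int) :=
  let bigrams := (PySem.List.pyRange 1 tokens.length 1).foldl (fun bigrams z =>
    if PySem.Str.startswith (PySem.List.pyGetD tokens (z - 1) "") "[" ||
       PySem.Str.startswith (PySem.List.pyGetD tokens (z - 1) "") "<" ||
       PySem.Str.startswith (PySem.List.pyGetD tokens z "") "[" ||
       PySem.Str.startswith (PySem.List.pyGetD tokens z "") "<" then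
      bigrams
    else
      bigrams ++ [PySem.List.pyGetD tokens (z - 1) "" ++ "_" ++ PySem.List.pyGetD tokens z ""]) []
  let d := PySem.Dict.counter bigrams
  -- Counter.most_common(top_n): stable sort by count descending, first top_n items ([] for negative top_n)
  if top_n < 0 then []
  else (PySem.List.sorted (PySem.Dict.items d) (fun kv => kv.2) true).take top_n.toNat

-- ===== PORT B =====
def get_top_bigrams_exclude_special_tokens_py_alt (tokens : List String) (top_n : Int) : List (String × Int) :=
  let st := tokens.foldl (fun (p : List (List String) × List String) t =>
    if PySem.Str.startswith t "[" || PySem.Str.startswith t "<" then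
      (if p.2 = [] then p.1 else p.1 ++ [p.2], [])
    else (p.1, p.2 ++ [t])) ([], [])
  let runs := if st.2 = [] then st.1 else st.1 ++ [st.2]
  let bigrams := runs.flatMap (fun run => (run.zip run.tail).map (fun p => p.1 ++ "_" ++ p.2))
  -- Counter(bigrams).most_common(top_n)
  if top_n < 0 then []
  else (PySem.List.sorted (PySem.Dict.items (PySem.Dict.counter bigrams)) (fun kv => kv.2) true).take top_n.toNat

-- ===== PRECONDITION & SPEC =====
def Spec_get_top_bigrams_exclude_special_tokens_py (tokens : List String) (top_n : Int) (out : List (String × Int)) : Prop := out = get_top_bigrams_exclude_special_tokens_py_alt tokens top_n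
instance (tokens : List String) (top_n : Int) (out : List (String × Int)) : Decidable (Spec_get_top_bigrams_exclude_special_tokens_py tokens top_n out) := by unfold Spec_get_top_bigrams_exclude_special_tokens_py; infer_instance

-- ===== CLAIM (what is proved, stated in full; the proofs are below) =====
def Claim_equal_get_top_bigrams_exclude_special_tokens_py : Prop := ∀ (tokens : List String) (top_n : Int), Dom_get_top_bigrams_exclude_special_tokens_py tokens top_n → Spec_get_top_bigrams_exclude_special_tokens_py tokens top_n (get_top_bigrams_exclude_special_tokens_py tokens top_n)

-- ===== LEMMAS AND PROOFS =====

-- proof-side abbreviations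
def pvSpec (t : String) : Bool := PySem.Str.startswith t "[" || PySem.Str.startswith t "<"

def pvQ (s t : String) : Option String :=
  if pvSpec s || pvSpec t then none else some (s ++ "_" ++ t)

-- A's kept bigrams: filtered adjacent pairs
def pvF (l : List String) : List String := (l.zip l.tail).filterMap (fun p => pvQ p.1 p.2)

-- a run's internal adjacent pairs
def pvPairs (run : List String) : List String := (run.zip run.tail).map (fun p => p.1 ++ "_" ++ p.2)

-- the run-splitting recursion, as a function of the open run and the remaining stream
def pvG : List String → List String → List String
  | cur, [] => pvPairs cur
  | cur, t :: r => if pvSpec t then pvPairs cur ++ pvG [] r else pvG (cur ++ [t]) r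

-- ---- A-side: the indexed loop builds pvF tokens ----

theorem pv_foldl_skip_if {β γ : Type} (l : List β) (c : β → Bool) (g : β → γ) (acc : List γ) :
    l.foldl (fun acc z => if c z then acc else acc ++ [g z]) acc
      = acc ++ (l.filter (fun z => !c z)).map g := by
  have h : (fun (acc : List γ) z => if c z then acc else acc ++ [g z])
      = (fun acc z => if !c z then acc ++ [g z] else acc) := by
    funext acc z; cases c z <;> simp
  rw [h, PySem.List.foldl_append_if]

theorem pv_filter_not_map_eq_filterMap {β γ : Type} (l : List β) (c : β → Bool) (g : β → γ) :
    (l.filter (fun z => !c z)).map g = l.filterMap (fun z => if c z then none else some (g z)) := by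
  induction l with
  | nil => rfl
  | cons x xs ih =>
    by_cases hx : c x = true <;>
      simp [hx, ih]

theorem pv_range_pairs (q : String → String → Option String) :
    ∀ (l : List String),
    (List.range (l.length - 1)).filterMap (fun k => q (l.getD k "") (l.getD (k + 1) ""))
      = (l.zip l.tail).filterMap (fun p => q p.1 p.2) := by
  intro l
  induction l with
  | nil => rfl
  | cons a tl ih =>
    cases tl with
    | nil => rfl
    | cons b r =>
      have hlen : (a :: b :: r).length - 1 = r.length + 1 := by simp
      rw [hlen, List.range_succ_eq_map, List.filterMap_cons, List.filterMap_map]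
      have hshift : ((fun k => q ((a :: b :: r).getD k "") ((a :: b :: r).getD (k + 1) "")) ∘ Nat.succ)
          = (fun k => q ((b :: r).getD k "") ((b :: r).getD (k + 1) "")) := by
        funext k; rfl
      have hlen2 : r.length = (b :: r).length - 1 := by simp
      rw [hshift, hlen2, ih]
      cases h : q a b <;>
        simp [List.zip_cons_cons, h]

theorem pv_bigramsA (tokens : List String) :
    (PySem.List.pyRange 1 tokens.length 1).foldl (fun bigrams z =>
      if PySem.Str.startswith (PySem.List.pyGetD tokens (z - 1) "") "[" ||
         PySem.Str.startswith (PySem.List.pyGetD tokens (z - 1) "") "<" ||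
         PySem.Str.startswith (PySem.List.pyGetD tokens z "") "[" ||
         PySem.Str.startswith (PySem.List.pyGetD tokens z "") "<" then
        bigrams
      else
        bigrams ++ [PySem.List.pyGetD tokens (z - 1) "" ++ "_" ++ PySem.List.pyGetD tokens z ""]) []
      = pvF tokens := by
  unfold pvF
  rw [pv_foldl_skip_if, pv_filter_not_map_eq_filterMap, List.nil_append]
  rw [PySem.List.pyRange_one, List.filterMap_map]
  have hcast : (↑tokens.length - 1 : Int).toNat = tokens.length - 1 := by omega
  rw [hcast, ← pv_range_pairs pvQ tokens]
  apply List.filterMap_congr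
  intro k _
  have h1 : (1 : Int) + ↑k - 1 = ((k : Nat) : Int) := by omega
  have h2 : (1 : Int) + ↑k = ((k + 1 : Nat) : Int) := by omega
  simp only [Function.comp]
  rw [h1, h2]
  simp only [PySem.List.pyGetD_natCast, pvQ, pvSpec, Bool.or_assoc]

-- ---- B-side: run segmentation also builds pvF tokens ----

theorem pv_drop_special (t : String) (ht : pvSpec t = true) (r : List String) :
    pvF (t :: r) = pvF r := by
  cases r with
  | nil => rfl
  | cons b r' => simp [pvF, pvQ, ht]

theorem pv_F_nonspec : ∀ (cur : List String), (∀ x ∈ cur, pvSpec x = false) → pvF cur = pvPairs cur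
  | [], _ => rfl
  | [_], _ => rfl
  | a :: b :: c, h => by
    have ha : pvSpec a = false := h a (by simp)
    have hb : pvSpec b = false := h b (by simp)
    have ih := pv_F_nonspec (b :: c) (fun x hx => h x (by simp [hx]))
    simp only [pvF, pvPairs, List.tail_cons] at ih ⊢
    have hq : pvQ a b = some (a ++ "_" ++ b) := by simp [pvQ, ha, hb]
    simp [List.zip_cons_cons, hq, ih]

theorem pv_F_split : ∀ (cur : List String), (∀ x ∈ cur, pvSpec x = false) →
    ∀ (t : String), pvSpec t = true → ∀ (r : List String),
    pvF (cur ++ t :: r) = pvPairs cur ++ pvF r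
  | [], _, t, ht, r => by simpa using pv_drop_special t ht r
  | [a], _, t, ht, r => by
    have hd := pv_drop_special t ht r
    simp only [List.cons_append, List.nil_append]
    have h1 : pvF (a :: t :: r) = pvF (t :: r) := by simp [pvF, pvQ, ht]
    simp [pvPairs, h1, hd]
  | a :: b :: c, h, t, ht, r => by
    have ha : pvSpec a = false := h a (by simp)
    have hb : pvSpec b = false := h b (by simp)
    have ih := pv_F_split (b :: c) (fun x hx => h x (by simp [hx])) t ht r
    simp only [List.cons_append] at ih ⊢
    simp only [pvF, pvPairs, List.tail_cons] at ih ⊢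
    have hq : pvQ a b = some (a ++ "_" ++ b) := by simp [pvQ, ha, hb]
    simp [List.zip_cons_cons, hq, ih]

theorem pv_G_F : ∀ (l cur : List String), (∀ x ∈ cur, pvSpec x = false) →
    pvG cur l = pvF (cur ++ l)
  | [], cur, h => by simpa [pvG] using (pv_F_nonspec cur h).symm
  | t :: r, cur, h => by
    by_cases ht : pvSpec t = true
    · rw [pvG]
      simp only [ht, if_true]
      rw [pv_G_F r [] (by simp)]
      simp only [List.nil_append]
      exact (pv_F_split cur h t ht r).symm
    · rw [pvG]
      simp only [ht]
      rw [pv_G_F r (cur ++ [t]) (by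
        intro x hx
        rcases List.mem_append.mp hx with hx | hx
        · exact h x hx
        · simp at hx; subst hx; simpa using ht)]
      simp

def pvStep (p : List (List String) × List String) (t : String) : List (List String) × List String :=
  if PySem.Str.startswith t "[" || PySem.Str.startswith t "<" then
    (if p.2 = [] then p.1 else p.1 ++ [p.2], [])
  else (p.1, p.2 ++ [t])

def pvFinish (st : List (List String) × List String) : List String :=
  (if st.2 = [] then st.1 else st.1 ++ [st.2]).flatMap pvPairs

theorem pv_fold_runs : ∀ (l : List String) (runs : List (List String)) (cur : List String),
    pvFinish (l.foldl pvStep (runs, cur)) = runs.flatMap pvPairs ++ pvG cur l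
  | [], runs, cur => by
    rcases eq_or_ne cur [] with hc | hc <;>
      simp [pvFinish, pvG, hc, pvPairs]
  | t :: r, runs, cur => by
    have hc : (PySem.Str.startswith t "[" || PySem.Str.startswith t "<") = pvSpec t := rfl
    rw [List.foldl_cons]
    by_cases ht : pvSpec t = true
    · have hstep : pvStep (runs, cur) t = (if cur = [] then runs else runs ++ [cur], []) := by
        simp only [pvStep, hc, ht, if_true]
      rw [hstep, pv_fold_runs r _ []]
      rcases eq_or_ne cur [] with h0 | h0 <;>
        simp [pvG, ht, h0, pvPairs]
    · have hstep : pvStep (runs, cur) t = (runs, cur ++ [t]) := by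
        simp only [pvStep, hc, ht]
        simp
      rw [hstep, pv_fold_runs r runs (cur ++ [t])]
      simp [pvG, ht]

theorem pv_bigramsB (tokens : List String) :
    pvFinish (tokens.foldl pvStep ([], [])) = pvF tokens := by
  rw [pv_fold_runs tokens [] [], pv_G_F tokens [] (by simp)]
  simp

-- ===== VERDICT (by name: the statement is the Claim_ definition above) =====
theorem get_top_bigrams_exclude_special_tokens_py_spec : Claim_equal_get_top_bigrams_exclude_special_tokens_py := by
  intro tokens top_n _
  unfold Spec_get_top_bigrams_exclude_special_tokens_py
  show (if top_n < 0 then [] else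
      (PySem.List.sorted (PySem.Dict.items (PySem.Dict.counter
        ((PySem.List.pyRange 1 tokens.length 1).foldl (fun bigrams z =>
          if PySem.Str.startswith (PySem.List.pyGetD tokens (z - 1) "") "[" ||
             PySem.Str.startswith (PySem.List.pyGetD tokens (z - 1) "") "<" ||
             PySem.Str.startswith (PySem.List.pyGetD tokens z "") "[" ||
             PySem.Str.startswith (PySem.List.pyGetD tokens z "") "<" then
            bigrams
          else
            bigrams ++ [PySem.List.pyGetD tokens (z - 1) "" ++ "_" ++ PySem.List.pyGetD tokens z ""]) [])))
        (fun kv => kv.2) true).take top_n.toNat)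
    = (if top_n < 0 then [] else
      (PySem.List.sorted (PySem.Dict.items (PySem.Dict.counter
        (pvFinish (tokens.foldl pvStep ([], [])))))
        (fun kv => kv.2) true).take top_n.toNat)
  rw [pv_bigramsA tokens, pv_bigramsB tokens]
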